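-- pv_equiv track=rewrite | github.com/darren-moy/algos | antproblem.py | calculate_final_positions
-- ===== SOURCE A (Python) =====
-- def calculate_final_positions(N, M, T, ant_positions):
--     final_positions = []
--
--     for ant in ant_positions:
--         position, direction = ant
--
--         # Calculate the net displacement after T seconds
--         displacement = (T * direction) % N
--
--         # Calculate the final position
--         final_position = (position + displacement) % N
--
--         # Handle the case where the final position becomes 0
--         if final_position == 0:
--             final_position = N
--
--         final_positions.append(final_position)
--
--     final_positions.sort()
--     return final_positions
-- ===== SOURCE B (Python) =====
-- def calculate_final_positions(N, M, T, ant_positions):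
--     # Online insertion sort: keep `result` sorted at all times, and compute
--     # each final position with a single modulo ((p + T*d) % N == (p + (T*d)%N) % N).
--     result = []
--     for position, direction in ant_positions:
--         final_position = (position + T * direction) % N or N
--         i = 0
--         while i < len(result) and result[i] <= final_position:
--             i += 1
--         result[i:i] = [final_position]
--     return result
-- ===== Notes on version B (the rewrite author's own statement) =====
-- stated objective: alternative
-- what changed: B keeps the output list sorted at all times by inserting each ant's final position at its place (online insertion sort) instead of appending everything and calling .sort(), and computes each final position with a single modulo, folding away A's intermediate displacement step.
import Mathlib
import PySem

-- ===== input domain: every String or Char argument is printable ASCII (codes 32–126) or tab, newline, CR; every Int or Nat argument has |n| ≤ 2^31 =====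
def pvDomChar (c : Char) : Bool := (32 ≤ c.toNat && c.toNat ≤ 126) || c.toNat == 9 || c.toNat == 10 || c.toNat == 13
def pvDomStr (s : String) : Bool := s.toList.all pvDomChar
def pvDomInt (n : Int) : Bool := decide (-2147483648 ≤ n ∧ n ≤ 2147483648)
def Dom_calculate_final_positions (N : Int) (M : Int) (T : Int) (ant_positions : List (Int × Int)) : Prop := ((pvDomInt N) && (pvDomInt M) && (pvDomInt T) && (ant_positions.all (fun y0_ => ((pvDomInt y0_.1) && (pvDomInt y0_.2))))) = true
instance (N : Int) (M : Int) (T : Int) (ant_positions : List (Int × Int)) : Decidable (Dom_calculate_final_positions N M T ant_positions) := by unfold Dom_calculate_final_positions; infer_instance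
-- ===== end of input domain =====

-- B keeps the result sorted by online insertion (insertion sort) instead of append-then-sort,
-- and computes each final position with a single modulo; equal return value wherever A returns.


-- ===== PORT A =====
def calculate_final_positions (N : Int) (M : Int) (T : Int) (ant_positions : List (Int × Int)) : List Int :=
  let final_positions : List Int :=
    ant_positions.foldl (fun final_positions ant =>
      let position := ant.1
      let direction := ant.2
      let displacement := PySem.Int.mod (T * direction) N
      let final_position := PySem.Int.mod (position + displacement) N
      let final_position := if final_position = 0 then N else final_position
      final_positions ++ [final_position]) []
  PySem.List.sorted final_positions (fun x => x)

-- ===== PORT B =====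
-- B's `while i < len(result) and result[i] <= fp` scan + splice, as the obvious structural recursion
def pvInsertSorted (v : Int) (xs : List Int) : List Int :=
  match xs with
  | [] => [v]
  | y :: ys => if y ≤ v then y :: pvInsertSorted v ys else v :: y :: ys

def calculate_final_positions_alt (N : Int) (M : Int) (T : Int) (ant_positions : List (Int × Int)) : List Int :=
  ant_positions.foldl (fun result ant =>
    let fp0 := PySem.Int.mod (ant.1 + T * ant.2) N
    let final_position := if fp0 = 0 then N else fp0
    pvInsertSorted final_position result) []

-- ===== PRECONDITION & SPEC =====
-- Pre_ excludes exactly the inputs where Python A raises ZeroDivisionError (N == 0 with at least one ant).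
def Pre_calculate_final_positions (N : Int) (M : Int) (T : Int) (ant_positions : List (Int × Int)) : Prop :=
  N ≠ 0 ∨ ant_positions = []
instance (N : Int) (M : Int) (T : Int) (ant_positions : List (Int × Int)) : Decidable (Pre_calculate_final_positions N M T ant_positions) := by unfold Pre_calculate_final_positions; infer_instance

def pvWitness_calculate_final_positions : Int × Int × Int × (List (Int × Int)) := (5, 2, 3, [(1, 1), (4, -1), (2, 1)])

def Spec_calculate_final_positions (N : Int) (M : Int) (T : Int) (ant_positions : List (Int × Int)) (out : List Int) : Prop := out = calculate_final_positions_alt N M T ant_positions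
instance (N : Int) (M : Int) (T : Int) (ant_positions : List (Int × Int)) (out : List Int) : Decidable (Spec_calculate_final_positions N M T ant_positions out) := by unfold Spec_calculate_final_positions; infer_instance

-- ===== CLAIM (what is proved, stated in full; the proofs are below) =====
def Claim_equal_calculate_final_positions : Prop := ∀ (N : Int) (M : Int) (T : Int) (ant_positions : List (Int × Int)), Dom_calculate_final_positions N M T ant_positions → Pre_calculate_final_positions N M T ant_positions → Spec_calculate_final_positions N M T ant_positions (calculate_final_positions N M T ant_positions)

-- ===== LEMMAS AND PROOFS =====

-- Python's (p + q % N) % N = (p + q) % N (fmod; holds for every N, including N = 0)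
theorem pv_mod_add_mod (p q N : Int) :
    PySem.Int.mod (p + PySem.Int.mod q N) N = PySem.Int.mod (p + q) N := by
  unfold PySem.Int.mod
  rw [Int.fmod_def q N]
  have h : p + (q - N * (q.fdiv N)) = p + q + N * (-(q.fdiv N)) := by ring
  rw [h, Int.add_mul_fmod_self_left]

-- B's insertion helper is PySem's insertBy with the strict "goes before" test
theorem pvInsertSorted_eq_insertBy (v : Int) (xs : List Int) :
    pvInsertSorted v xs = PySem.List.insertBy (fun a b => decide (a < b)) v xs := by
  induction xs with
  | nil => rfl
  | cons y ys ih =>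
    simp only [pvInsertSorted, PySem.List.insertBy, ih]
    by_cases h : y ≤ v
    · simp [h, not_lt.mpr h]
    · simp [h, lt_of_not_ge h]

theorem pv_foldl_append (f : (Int × Int) → Int) (l : List (Int × Int)) (acc : List Int) :
    l.foldl (fun a x => a ++ [f x]) acc = acc ++ l.map f := by
  induction l generalizing acc with
  | nil => simp
  | cons x xs ih => simp [ih]

-- ===== VERDICT (by name: the statement is the Claim_ definition above) =====
theorem calculate_final_positions_spec : Claim_equal_calculate_final_positions := by
  intro N M T ants _ _
  unfold Spec_calculate_final_positions calculate_final_positions calculate_final_positions_alt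
  simp only [pv_foldl_append, List.nil_append,
    PySem.List.sorted_eq_foldl_insertBy, List.foldl_map]
  simp only [pvInsertSorted_eq_insertBy, pv_mod_add_mod]
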